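-- pv_equiv track=rewrite | github.com/alanTBST/tablesalt | tablesalt/topology/pathfinder.py | operators_in_touched_
-- ===== SOURCE A (Python) =====
-- from typing import Tuple, Union, Optional, Dict, Any
--
-- def operators_in_touched_(
--         tzones: Tuple[int, ...],
--         zonelegs: Tuple[Tuple[int, ...]],
--         oplegs: Tuple[Tuple[int, ...]]
--         ) -> Dict[int, Tuple[int, ...]]:
--     """
--     determine the operators in the zones that are touched by the user
--
--     :param tzones: a tuple of the zones touched by a rejsekort tap on a trip
--     :type tzones: Tuple[int, ...]
--     :param zonelegs: a legified tuple of zones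
--     :type zonelegs: Tuple[Tuple[int, ...]]
--     :param oplegs: a legified tuple of operators
--     :type oplegs: Tuple[Tuple[int, ...]]
--     :return: Tuple[Tuple[int, ...]]
--     :rtype: Dict[int, Tuple[int, ...]]:
--
--     """
--
--     ops_in_touched = {}
--     for tzone in tzones:
--         ops = []
--         for i, j in enumerate(zonelegs):
--             if tzone in j:
--                 l_ops = list(oplegs[i])
--                 ops.extend(l_ops)
--         # modulo:  only put in one operator value per leg
--         ops_in_touched[tzone] = \
--             tuple(j for i, j in enumerate(ops) if i % 2 == 0)
--
--     return ops_in_touched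
-- ===== SOURCE B (Python) =====
-- def operators_in_touched_(tzones, zonelegs, oplegs):
--     # one pass: zone -> concatenated operator legs, then gather per touched zone
--     zmap = {}
--     for leg, opl in zip(zonelegs, oplegs):
--         lopl = list(opl)
--         for z in dict.fromkeys(leg):
--             zmap[z] = zmap.get(z, []) + lopl
--     return {t: tuple(zmap.get(t, [])[::2]) for t in tzones}
-- ===== Notes on version B (the rewrite author's own statement) =====
-- stated objective: faster
-- what changed: B builds a zone->concatenated-operators dict in one pass over the zipped legs and then just looks each touched zone up, instead of A's rescan of all zonelegs (with membership test and oplegs indexing) for every touched zone.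
import Mathlib
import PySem

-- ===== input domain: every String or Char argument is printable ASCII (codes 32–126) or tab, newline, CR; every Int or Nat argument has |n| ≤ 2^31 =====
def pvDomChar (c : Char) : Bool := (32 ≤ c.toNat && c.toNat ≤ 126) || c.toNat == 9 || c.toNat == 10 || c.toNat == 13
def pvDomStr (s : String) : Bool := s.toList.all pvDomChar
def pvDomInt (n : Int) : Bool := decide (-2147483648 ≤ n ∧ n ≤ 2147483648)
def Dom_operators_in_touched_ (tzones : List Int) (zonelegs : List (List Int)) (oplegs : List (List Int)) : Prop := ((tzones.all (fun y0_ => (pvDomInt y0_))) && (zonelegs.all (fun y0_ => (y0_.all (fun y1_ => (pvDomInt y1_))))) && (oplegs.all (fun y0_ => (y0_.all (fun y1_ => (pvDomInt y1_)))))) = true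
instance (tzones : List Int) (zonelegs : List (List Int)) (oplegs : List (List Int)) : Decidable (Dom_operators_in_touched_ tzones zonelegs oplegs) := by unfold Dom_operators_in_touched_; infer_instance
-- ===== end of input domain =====

-- B replaces A's per-touched-zone rescan of all zonelegs by a single zone→operators index built once; return value only, no mutation involved.

-- ===== PORT A =====
def operators_in_touched_ (tzones : List Int) (zonelegs : List (List Int)) (oplegs : List (List Int)) : List (Int × List Int) :=
  (tzones.foldl (fun d tzone =>
      let ops : List Int := (PySem.List.enumerate zonelegs 0).foldl
        (fun ops ij => if tzone ∈ ij.2 then ops ++ PySem.List.pyGetD oplegs ij.1 [] else ops) []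
      d.insert tzone (((PySem.List.enumerate ops 0).filter (fun ij => ij.1 % 2 == 0)).map (·.2)))
    PySem.Dict.empty).items

-- ===== PORT B =====
-- exact hand port of Python's xs[::2] (every second element, starting at index 0)
def step2 {α : Type} : List α → List α
  | [] => []
  | [x] => [x]
  | x :: _ :: xs => x :: step2 xs

def operators_in_touched__alt (tzones : List Int) (zonelegs : List (List Int)) (oplegs : List (List Int)) : List (Int × List Int) :=
  let zmap : PySem.Dict Int (List Int) :=
    (zonelegs.zip oplegs).foldl
      (fun m p => (PySem.List.dedup p.1).foldl (fun m z => m.modify z [] (· ++ p.2)) m)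
      PySem.Dict.empty
  (tzones.foldl (fun d t => d.insert t (step2 (zmap.getD t []))) PySem.Dict.empty).items

-- ===== PRECONDITION & SPEC =====
-- Pre_ excludes exactly the inputs where Python A raises IndexError: a leg beyond len(oplegs) containing a touched zone.
def Pre_operators_in_touched_ (tzones : List Int) (zonelegs : List (List Int)) (oplegs : List (List Int)) : Prop :=
  ∀ leg ∈ zonelegs.drop oplegs.length, ∀ t ∈ tzones, t ∉ leg
instance (tzones : List Int) (zonelegs : List (List Int)) (oplegs : List (List Int)) : Decidable (Pre_operators_in_touched_ tzones zonelegs oplegs) := by unfold Pre_operators_in_touched_; infer_instance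

def pvWitness_operators_in_touched_ : List Int × List (List Int) × List (List Int) := ([1, 2], [[1], [2, 3]], [[7, 8], [9]])


def Spec_operators_in_touched_ (tzones : List Int) (zonelegs : List (List Int)) (oplegs : List (List Int)) (out : List (Int × List Int)) : Prop := out = operators_in_touched__alt tzones zonelegs oplegs
instance (tzones : List Int) (zonelegs : List (List Int)) (oplegs : List (List Int)) (out : List (Int × List Int)) : Decidable (Spec_operators_in_touched_ tzones zonelegs oplegs out) := by unfold Spec_operators_in_touched_; infer_instance

-- ===== CLAIM (what is proved, stated in full; the proofs are below) =====
def Claim_equal_operators_in_touched_ : Prop := ∀ (tzones : List Int) (zonelegs : List (List Int)) (oplegs : List (List Int)), Dom_operators_in_touched_ tzones zonelegs oplegs → Pre_operators_in_touched_ tzones zonelegs oplegs → Spec_operators_in_touched_ tzones zonelegs oplegs (operators_in_touched_ tzones zonelegs oplegs)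


-- ===== LEMMAS AND PROOFS =====

-- inner loop of B's index build: appending opl at each distinct zone of a leg
lemma getD_fold_modify_nodup (opl : List Int) (z : Int) :
    ∀ (l : List Int), l.Nodup → ∀ (m : PySem.Dict Int (List Int)),
      (l.foldl (fun m z' => m.modify z' [] (· ++ opl)) m).getD z []
        = m.getD z [] ++ (if z ∈ l then opl else []) := by
  intro l
  induction l with
  | nil => intro _ m; simp
  | cons a l ih =>
    intro hnd m
    simp only [List.foldl_cons]
    rw [ih hnd.of_cons]
    rw [PySem.Dict.getD_modify]
    by_cases hz : z = a
    · subst hz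
      have : z ∉ l := (List.nodup_cons.mp hnd).1
      simp [this]
    · simp [hz, List.mem_cons]

-- outer loop of B's index build
lemma getD_zmap (z : Int) :
    ∀ (pairs : List (List Int × List Int)) (m : PySem.Dict Int (List Int)),
      (pairs.foldl (fun m p => (PySem.List.dedup p.1).foldl (fun m z' => m.modify z' [] (· ++ p.2)) m) m).getD z []
        = m.getD z [] ++ (pairs.filter (fun p => decide (z ∈ p.1))).flatMap (·.2) := by
  intro pairs
  induction pairs with
  | nil => intro m; simp
  | cons p pairs ih =>
    intro m
    simp only [List.foldl_cons]
    rw [ih]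
    rw [getD_fold_modify_nodup p.2 z _ (PySem.List.nodup_dedup p.1)]
    by_cases hz : z ∈ p.1
    · simp [hz]
    · simp [hz]

-- A's inner scan over enumerate equals the zip-based concatenation (out-of-range oplegs contribute [])
lemma A_ops (t : Int) :
    ∀ (zl : List (List Int)) (ol : List (List Int)) (s : ℕ) (init : List Int),
      (PySem.List.enumerate zl (s : Int)).foldl
          (fun ops ij => if t ∈ ij.2 then ops ++ PySem.List.pyGetD ol ij.1 [] else ops) init
        = init ++ ((zl.zip (ol.drop s)).filter (fun p => decide (t ∈ p.1))).flatMap (·.2) := by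
  intro zl
  induction zl with
  | nil => intro ol s init; simp [PySem.List.enumerate_nil]
  | cons x zl ih =>
    intro ol s init
    rw [PySem.List.enumerate_cons]
    simp only [List.foldl_cons]
    have hstep : ((s : Int) + 1) = ((s + 1 : ℕ) : Int) := by push_cast; ring
    by_cases hs : s < ol.length
    · have hdrop : ol.drop s = ol[s] :: ol.drop (s + 1) := by
        rw [List.drop_eq_getElem_cons hs]
      have hget : PySem.List.pyGetD ol (s : Int) [] = ol[s] := by
        rw [PySem.List.pyGetD_natCast]
        simp [List.getD_eq_getElem?_getD, List.getElem?_eq_getElem hs]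
      rw [hstep, ih ol (s + 1), hdrop]
      simp only [List.zip_cons_cons, List.filter_cons]
      by_cases ht : t ∈ x
      · simp only [ht, decide_true, if_true, hget, List.flatMap_cons, List.append_assoc]
      · simp only [ht, decide_false, Bool.false_eq_true, if_false]
    · have hge : ol.length ≤ s := Nat.le_of_not_lt hs
      have hdrop : ol.drop s = [] := List.drop_eq_nil_of_le hge
      have hdrop' : ol.drop (s + 1) = [] := List.drop_eq_nil_of_le (Nat.le_succ_of_le hge)
      have hget : PySem.List.pyGetD ol (s : Int) [] = [] := by
        rw [PySem.List.pyGetD_natCast]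
        exact List.getD_eq_default _ _ hge
      rw [hstep, ih ol (s + 1)]
      rw [hdrop, hdrop']
      by_cases ht : t ∈ x <;> simp [ht, hget]

-- A's even-index comprehension is xs[::2]
lemma evenFilter (l : List Int) :
    ∀ (n : Int), n % 2 = 0 → ((PySem.List.enumerate l n).filter (fun ij => ij.1 % 2 == 0)).map (·.2) = step2 l := by
  induction l using step2.induct with
  | case1 => intro n _; simp [PySem.List.enumerate_nil, step2]
  | case2 x =>
    intro n hn
    rw [PySem.List.enumerate_cons]
    simp [PySem.List.enumerate_nil, step2, hn]
  | case3 x y xs ih =>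
    intro n hn
    rw [PySem.List.enumerate_cons, PySem.List.enumerate_cons]
    have h3 : (n + 1) % 2 ≠ 0 := by omega
    have h4 : (n + 1 + 1) % 2 = 0 := by omega
    simp only [List.filter_cons, hn, h3, beq_iff_eq, decide_true, decide_false,
      if_true, if_false, List.map_cons, step2]
    rw [ih (n + 1 + 1) h4]
lemma evenFilter0 (l : List Int) :
    ((PySem.List.enumerate l 0).filter (fun ij => ij.1 % 2 == 0)).map (·.2) = step2 l := by
  exact evenFilter l 0 (by decide)

-- ===== VERDICT (by name: the statement is the Claim_ definition above) =====
theorem operators_in_touched__spec : Claim_equal_operators_in_touched_ := by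
  intro tzones zonelegs oplegs _hdom _hpre
  unfold Spec_operators_in_touched_
  unfold operators_in_touched_ operators_in_touched__alt
  simp only []
  congr 1
  apply PySem.List.foldl_congr_mem
  intro acc t _ht
  congr 1
  rw [getD_zmap t (zonelegs.zip oplegs) PySem.Dict.empty]
  rw [PySem.Dict.getD_empty]
  have hops := A_ops t zonelegs oplegs 0 []
  simp only [Nat.cast_zero, List.drop_zero, List.nil_append] at hops
  rw [hops]
  exact evenFilter0 _
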